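-- pv_equiv track=rewrite | github.com/SantiagodeViana/Project-Euler | Python/Project Euler #164 (por revisar).py | three_digit_sum
-- ===== SOURCE A (Python) =====
-- def three_digit_sum(n: int) -> int:
--     if n < 100: #Descartando números de menos de 3 dígitos
--         return 1
--     else:
--         sum = 0
--         aux2 = n % 10
--         n //= 10
--         aux = n % 10
--         n //= 10
--         while n > 0 and sum <= 9:
--             sum = (n % 10) + aux + aux2
--             aux2 = aux
--             aux = n % 10
--             n //= 10
--     if sum <= 9:
--         return 1
--     else:
--         return 0
-- ===== SOURCE B (Python) =====
-- def three_digit_sum(n: int) -> int: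
--     if n < 100:
--         return 1
--     digits = []
--     m = n
--     while m > 0:
--         digits.append(m % 10)
--         m //= 10
--     for a, b, c in zip(digits, digits[1:], digits[2:]):
--         if a + b + c > 9:
--             return 0
--     return 1
-- ===== Notes on version B (the rewrite author's own statement) =====
-- stated objective: simpler
-- what changed: B materializes the digit list in one extraction loop and then scans adjacent triples with zip, instead of A's single loop interleaving digit extraction with three carried scalar variables and a running sum.
import Mathlib
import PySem

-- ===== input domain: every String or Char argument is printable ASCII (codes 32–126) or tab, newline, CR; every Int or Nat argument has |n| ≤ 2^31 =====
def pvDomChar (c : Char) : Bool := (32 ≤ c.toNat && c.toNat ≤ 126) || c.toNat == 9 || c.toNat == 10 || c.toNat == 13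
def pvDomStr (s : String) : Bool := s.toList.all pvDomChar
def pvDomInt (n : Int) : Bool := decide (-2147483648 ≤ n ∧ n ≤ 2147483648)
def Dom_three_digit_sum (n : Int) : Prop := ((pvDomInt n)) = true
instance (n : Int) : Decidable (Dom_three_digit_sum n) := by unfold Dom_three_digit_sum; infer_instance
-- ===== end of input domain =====

-- B separates digit extraction from the triple-window scan (extract-then-zip) instead of
-- A's single loop carrying three scalars and a running sum; same cost, plainer structure.

-- ===== PORT A =====
-- A's while loop: state (n, sum, aux, aux2), one step per digit.
def pvALoop (n sum aux aux2 : Int) : Int :=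
  if n > 0 ∧ sum ≤ 9 then
    pvALoop (PySem.Int.floordiv n 10) (PySem.Int.mod n 10 + aux + aux2) (PySem.Int.mod n 10) aux
  else sum
termination_by n.toNat
decreasing_by
  rename_i h
  rw [PySem.Int.floordiv_eq_ediv_of_pos (by omega : (0:Int) < 10)]
  omega

def three_digit_sum (n : Int) : Int :=
  if n < 100 then 1
  else
    let aux2 := PySem.Int.mod n 10
    let n1 := PySem.Int.floordiv n 10
    let aux := PySem.Int.mod n1 10
    let n2 := PySem.Int.floordiv n1 10
    let sum := pvALoop n2 0 aux aux2
    if sum ≤ 9 then 1 else 0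

-- ===== PORT B =====
-- the digit-extraction while loop (least-significant digit first, as Source B appends)
def pvBDigits (m : Int) : List Int :=
  if m > 0 then PySem.Int.mod m 10 :: pvBDigits (PySem.Int.floordiv m 10) else []
termination_by m.toNat
decreasing_by
  rename_i h
  rw [PySem.Int.floordiv_eq_ediv_of_pos (by omega : (0:Int) < 10)]
  omega

-- the 'for a, b, c in zip(digits, digits[1:], digits[2:])' early-exit scan
def pvBScan : List Int → Int
  | a :: b :: c :: rest => if a + b + c > 9 then 0 else pvBScan (b :: c :: rest)
  | _ => 1

def three_digit_sum_alt (n : Int) : Int :=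
  if n < 100 then 1 else pvBScan (pvBDigits n)

-- ===== PRECONDITION & SPEC =====
def Spec_three_digit_sum (n : Int) (out : Int) : Prop := out = three_digit_sum_alt n
instance (n : Int) (out : Int) : Decidable (Spec_three_digit_sum n out) := by unfold Spec_three_digit_sum; infer_instance

-- ===== CLAIM (what is proved, stated in full; the proofs are below) =====
def Claim_equal_three_digit_sum : Prop := ∀ (n : Int), Dom_three_digit_sum n → Spec_three_digit_sum n (three_digit_sum n)

-- ===== LEMMAS AND PROOFS =====

-- Key invariant: A's interleaved loop, thresholded at 9, computes B's scan of
-- the two carried digits followed by the remaining digit list.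
theorem pvALoop_eq_scan_aux (N : Nat) : ∀ (m : Int), m.toNat ≤ N → 0 ≤ m →
    ∀ s aux aux2 : Int, s ≤ 9 →
      (if pvALoop m s aux aux2 ≤ 9 then (1:Int) else 0) = pvBScan (aux2 :: aux :: pvBDigits m) := by
  induction N with
  | zero =>
    intro m hN hm s aux aux2 hs
    have hm0 : m = 0 := by omega
    subst hm0
    have h1 : pvALoop 0 s aux aux2 = s := by rw [pvALoop]; simp
    have h2 : pvBDigits 0 = [] := by rw [pvBDigits]; simp
    rw [h1, h2, if_pos hs]
    rfl
  | succ N ih =>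
    intro m hN hm s aux aux2 hs
    by_cases hpos : m > 0
    · have hfd : PySem.Int.floordiv m 10 = m / 10 :=
        PySem.Int.floordiv_eq_ediv_of_pos (by omega)
      have hmd : PySem.Int.mod m 10 = m % 10 :=
        PySem.Int.mod_eq_emod_of_pos (by omega)
      rw [pvALoop, if_pos (show m > 0 ∧ s ≤ 9 from ⟨hpos, hs⟩)]
      rw [pvBDigits, if_pos hpos, hfd, hmd]
      show _ = pvBScan (aux2 :: aux :: m % 10 :: pvBDigits (m / 10))
      rw [pvBScan]
      by_cases hbig : aux2 + aux + m % 10 > 9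
      · rw [if_pos hbig, pvALoop,
          if_neg (show ¬(m / 10 > 0 ∧ m % 10 + aux + aux2 ≤ 9) by omega),
          if_neg (show ¬(m % 10 + aux + aux2 ≤ 9) by omega)]
      · rw [if_neg hbig]
        exact ih (m / 10) (by omega) (by omega) (m % 10 + aux + aux2) (m % 10) aux (by omega)
    · have hm0 : m = 0 := by omega
      subst hm0
      have h1 : pvALoop 0 s aux aux2 = s := by rw [pvALoop]; simp
      have h2 : pvBDigits 0 = [] := by rw [pvBDigits]; simp
      rw [h1, h2, if_pos hs]
      rfl

-- ===== VERDICT (by name: the statement is the Claim_ definition above) =====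
theorem three_digit_sum_spec : Claim_equal_three_digit_sum := by
  intro n _
  unfold Spec_three_digit_sum three_digit_sum three_digit_sum_alt
  by_cases hlt : n < 100
  · simp [hlt]
  · rw [if_neg hlt, if_neg hlt]
    have h100 : (100:Int) ≤ n := by omega
    have hfd : PySem.Int.floordiv n 10 = n / 10 :=
      PySem.Int.floordiv_eq_ediv_of_pos (by omega)
    have hmd : PySem.Int.mod n 10 = n % 10 :=
      PySem.Int.mod_eq_emod_of_pos (by omega)
    have h10 : (10:Int) ≤ n / 10 := by omega
    have hfd2 : PySem.Int.floordiv (n / 10) 10 = n / 10 / 10 :=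
      PySem.Int.floordiv_eq_ediv_of_pos (by omega)
    have hmd2 : PySem.Int.mod (n / 10) 10 = n / 10 % 10 :=
      PySem.Int.mod_eq_emod_of_pos (by omega)
    have hdig : pvBDigits n = n % 10 :: n / 10 % 10 :: pvBDigits (n / 10 / 10) := by
      rw [pvBDigits, if_pos (by omega), hmd, hfd, pvBDigits, if_pos (by omega), hmd2, hfd2]
    simp only [hdig, hfd, hmd, hfd2, hmd2]
    exact pvALoop_eq_scan_aux (n / 10 / 10).toNat (n / 10 / 10) le_rfl (by omega) 0 (n / 10 % 10) (n % 10) (by omega)
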